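-- pv_equiv track=rewrite | github.com/IrwinLai/LeetCode | 5146. Distinct Echo Substrings contest1.11.py | distinctEchoSubstrings
-- ===== SOURCE A (Python) =====
-- def distinctEchoSubstrings(text: str) -> int:
--     l = []
--     for i in range(len(text)):
--         for j in range(i+2,len(text)+1,2):
--             t = (j-i)//2
--             if text[i:i+t] == text[i+t:j]:
--                 l.append(text[i:j])
--     return len(set(l))
-- ===== SOURCE B (Python) =====
-- def distinctEchoSubstrings(text: str) -> int:
--     # For each half-length t, scan right-to-left keeping a run length of
--     # consecutive positions k with text[k] == text[k+t]; a run of >= t at k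
--     # means text[k:k+t] == text[k+t:k+2t].  O(n^2) instead of A's O(n^3).
--     n = len(text)
--     seen = set()
--     for t in range(1, n // 2 + 1):
--         streak = 0
--         for k in range(n - t - 1, -1, -1):
--             streak = streak + 1 if text[k] == text[k + t] else 0
--             if streak >= t:
--                 seen.add(text[k:k + 2 * t])
--     return len(seen)
-- ===== Notes on version B (the rewrite author's own statement) =====
-- stated objective: faster
-- what changed: Replaces A's triple-nested slice comparison (for every start i and even length, compare the two halves) by a per-half-length right-to-left scan that maintains the run length of positions k with text[k]==text[k+t], reporting an echo exactly when the run reaches t, and collects results directly in a set.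
import Mathlib
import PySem

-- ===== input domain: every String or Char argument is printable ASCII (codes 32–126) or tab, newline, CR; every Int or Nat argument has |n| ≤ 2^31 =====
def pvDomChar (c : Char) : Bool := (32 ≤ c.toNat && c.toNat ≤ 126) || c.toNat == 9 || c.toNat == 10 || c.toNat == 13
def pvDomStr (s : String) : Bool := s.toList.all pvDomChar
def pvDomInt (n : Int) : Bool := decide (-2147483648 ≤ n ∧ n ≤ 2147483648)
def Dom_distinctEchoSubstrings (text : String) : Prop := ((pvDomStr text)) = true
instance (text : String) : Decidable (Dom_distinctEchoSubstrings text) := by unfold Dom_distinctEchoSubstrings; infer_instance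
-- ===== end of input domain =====

-- B replaces A's cubic all-pairs slice comparison by a per-half-length run-length scan (O(n^2)); equal return value proved.

-- ===== PORT A =====
-- inner loop: for j in range(i+2, len(text)+1, 2): compare the two halves, append the echo
def pvInnerA (cs : List Char) (i : Int) (l : List (List Char)) : List (List Char) :=
  (PySem.List.pyRange (i + 2) (PySem.List.len cs + 1) 2).foldl (fun l j =>
    let t := PySem.Int.floordiv (j - i) 2
    if PySem.List.slice cs (some i) (some (i + t)) = PySem.List.slice cs (some (i + t)) (some j)
    then l ++ [PySem.List.slice cs (some i) (some j)] else l) l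

-- outer loop: for i in range(len(text)), building the list l
def pvListA (cs : List Char) : List (List Char) :=
  (PySem.List.pyRange 0 (PySem.List.len cs) 1).foldl (fun l i => pvInnerA cs i l) []

def distinctEchoSubstrings (text : String) : Int :=
  PySem.Set.len (PySem.Set.ofList (pvListA text.toList))

-- ===== PORT B =====
-- one step of B's right-to-left scan: update the streak, add the echo when streak >= t
def pvStepB (cs : List Char) (t : Int) (p : Int × PySem.Set (List Char)) (k : Int) :
    Int × PySem.Set (List Char) :=
  let streak : Int :=
    if PySem.List.pyGetD cs k ' ' = PySem.List.pyGetD cs (k + t) ' ' then p.1 + 1 else 0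
  (streak,
    if t ≤ streak then PySem.Set.add p.2 (PySem.List.slice cs (some k) (some (k + 2 * t)))
    else p.2)

-- the whole scan for one half-length t: for k in range(n - t - 1, -1, -1)
def pvLevelB (cs : List Char) (t : Int) (seen : PySem.Set (List Char)) : PySem.Set (List Char) :=
  ((PySem.List.pyRange (PySem.List.len cs - t - 1) (-1) (-1)).foldl (pvStepB cs t) (0, seen)).2

def distinctEchoSubstrings_alt (text : String) : Int :=
  PySem.Set.len
    ((PySem.List.pyRange 1 (PySem.Int.floordiv (PySem.List.len text.toList) 2 + 1) 1).foldl
      (fun seen t => pvLevelB text.toList t seen) PySem.Set.empty)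

-- ===== PRECONDITION & SPEC =====
def Spec_distinctEchoSubstrings (text : String) (out : Int) : Prop := out = distinctEchoSubstrings_alt text
instance (text : String) (out : Int) : Decidable (Spec_distinctEchoSubstrings text out) := by unfold Spec_distinctEchoSubstrings; infer_instance

-- ===== CLAIM (what is proved, stated in full; the proofs are below) =====
def Claim_equal_distinctEchoSubstrings : Prop := ∀ (text : String), Dom_distinctEchoSubstrings text → Spec_distinctEchoSubstrings text (distinctEchoSubstrings text)

-- ===== LEMMAS AND PROOFS =====

-- the run length of consecutive positions j ≥ k with cs[j] = cs[j+t] (B's streak, read left to right)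
def pvRun (cs : List Char) (t : ℕ) (k : ℕ) : ℕ :=
  if h : k + t < cs.length then
    (if cs.getD k ' ' = cs.getD (k + t) ' ' then pvRun cs t (k + 1) + 1 else 0)
  else 0
termination_by cs.length - k
decreasing_by omega

-- "x is an echo substring of cs"
def pvEcho (cs : List Char) (x : List Char) : Prop :=
  ∃ i t : ℕ, 1 ≤ t ∧ i + 2 * t ≤ cs.length ∧
    (cs.drop i).take t = (cs.drop (i + t)).take t ∧ x = (cs.drop i).take (2 * t)

theorem pvRun_ge_iff (cs : List Char) (t : ℕ) :
    ∀ (m k : ℕ), m ≤ pvRun cs t k ↔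
      ∀ j, j < m → k + j + t < cs.length ∧ cs.getD (k + j) ' ' = cs.getD (k + j + t) ' ' := by
  intro m
  induction m with
  | zero => intro k; simp
  | succ m ih =>
    intro k
    rw [pvRun]
    split
    · rename_i hlt
      split
      · rename_i hmatch
        rw [Nat.succ_le_succ_iff, ih (k + 1)]
        constructor
        · intro h j hj
          rcases Nat.eq_zero_or_pos j with hj0 | hj0
          · subst hj0; simpa using ⟨hlt, hmatch⟩
          · have := h (j - 1) (by omega)
            constructor
            · omega
            · have e1 : k + 1 + (j - 1) = k + j := by omega
              rw [e1] at this
              exact this.2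
        · intro h j hj
          have := h (j + 1) (by omega)
          constructor
          · omega
          · have e1 : k + (j + 1) = k + 1 + j := by omega
            rw [e1] at this
            exact this.2
      · rename_i hmatch
        simp only [Nat.succ_le_iff, Nat.not_lt_zero, false_iff]
        intro h
        exact hmatch (by simpa using (h 0 (by omega)).2)
    · rename_i hlt
      constructor
      · intro h; exact absurd h (by omega)
      · intro h
        exact absurd (by simpa using (h 0 (by omega)).1) hlt

theorem pvHalves_eq_iff (cs : List Char) (i t : ℕ) (h : i + 2 * t ≤ cs.length) :
    (cs.drop i).take t = (cs.drop (i + t)).take t ↔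
      ∀ j, j < t → cs.getD (i + j) ' ' = cs.getD (i + j + t) ' ' := by
  have hlen1 : ((cs.drop i).take t).length = t := by
    simp; omega
  have hlen2 : ((cs.drop (i + t)).take t).length = t := by
    simp; omega
  rw [List.ext_getElem_iff]
  simp only [hlen1, hlen2]
  constructor
  · intro ⟨_, hg⟩ j hj
    have := hg j hj hj
    rw [List.getElem_take, List.getElem_drop, List.getElem_take, List.getElem_drop] at this
    rw [List.getD_eq_getElem cs ' ' (by omega), List.getD_eq_getElem cs ' ' (by omega)]
    convert this using 2
    omega
  · intro hg
    refine ⟨by simp, fun j hj _ => ?_⟩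
    rw [List.getElem_take, List.getElem_drop, List.getElem_take, List.getElem_drop]
    have := hg j hj
    rw [List.getD_eq_getElem cs ' ' (by omega), List.getD_eq_getElem cs ' ' (by omega)] at this
    convert this using 2
    omega

theorem pvEcho_iff_run (cs : List Char) (i t : ℕ) (ht : 1 ≤ t) :
    (i + 2 * t ≤ cs.length ∧ (cs.drop i).take t = (cs.drop (i + t)).take t) ↔
      t ≤ pvRun cs t i := by
  rw [pvRun_ge_iff]
  constructor
  · intro ⟨hle, heq⟩ j hj
    exact ⟨by omega, (pvHalves_eq_iff cs i t hle).mp heq j hj⟩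
  · intro hall
    have hlast := (hall (t - 1) (by omega)).1
    have hle : i + 2 * t ≤ cs.length := by omega
    exact ⟨hle, (pvHalves_eq_iff cs i t hle).mpr (fun j hj => (hall j hj).2)⟩

theorem pvMemA (cs : List Char) (x : List Char) : x ∈ pvListA cs ↔ pvEcho cs x := by
  have hInner : ∀ (l : List (List Char)) (i : Int), pvInnerA cs i l =
      l ++ ((PySem.List.pyRange (i + 2) (PySem.List.len cs + 1) 2).filter
              (fun j => decide (PySem.List.slice cs (some i) (some (i + PySem.Int.floordiv (j - i) 2)) =
                PySem.List.slice cs (some (i + PySem.Int.floordiv (j - i) 2)) (some j)))).map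
            (fun j => PySem.List.slice cs (some i) (some j)) := by
    intro l i
    unfold pvInnerA
    exact PySem.List.foldl_append_ite
      (fun j => PySem.List.slice cs (some i) (some (i + PySem.Int.floordiv (j - i) 2)) =
                PySem.List.slice cs (some (i + PySem.Int.floordiv (j - i) 2)) (some j))
      (fun j => PySem.List.slice cs (some i) (some j)) _ l
  have hList : pvListA cs =
      (PySem.List.pyRange 0 (PySem.List.len cs) 1).flatMap (fun i =>
        ((PySem.List.pyRange (i + 2) (PySem.List.len cs + 1) 2).filter
              (fun j => decide (PySem.List.slice cs (some i) (some (i + PySem.Int.floordiv (j - i) 2)) =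
                PySem.List.slice cs (some (i + PySem.Int.floordiv (j - i) 2)) (some j)))).map
            (fun j => PySem.List.slice cs (some i) (some j))) := by
    unfold pvListA
    simp only [hInner]
    exact PySem.List.foldl_append_eq_flatMap _ _ []
  rw [hList]
  simp only [List.mem_flatMap, List.mem_map, List.mem_filter, PySem.List.mem_pyRange_one,
    PySem.List.mem_pyRange_iff_of_pos (by norm_num : (0:Int) < 2), PySem.List.len_eq,
    decide_eq_true_eq]
  constructor
  · rintro ⟨i, ⟨hi0, hin⟩, j, ⟨⟨hij, hjn, hdvd⟩, heq⟩, hx⟩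
    obtain ⟨i', rfl⟩ : ∃ i' : ℕ, i = (i' : Int) := ⟨i.toNat, by omega⟩
    obtain ⟨t', rfl⟩ : ∃ t' : ℕ, j = ((i' + 2 * t' : ℕ) : Int) := by
      obtain ⟨c, hc⟩ := hdvd
      refine ⟨(c + 1).toNat, ?_⟩
      push_cast
      omega
    have ht1 : 1 ≤ t' := by omega
    have hfd : PySem.Int.floordiv (((i' + 2 * t' : ℕ) : Int) - ↑i') 2 = (t' : Int) := by
      rw [PySem.Int.floordiv_eq_ediv_of_pos (by norm_num)]
      push_cast
      omega
    rw [hfd] at heq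
    have e1 : (i' : Int) + (t' : Int) = ((i' + t' : ℕ) : Int) := by push_cast; ring
    rw [e1, PySem.List.slice_natCast, PySem.List.slice_natCast] at heq
    rw [PySem.List.slice_natCast] at hx
    refine ⟨i', t', ht1, by omega, ?_, ?_⟩
    · convert heq using 2 <;> omega
    · rw [← hx]
      congr 1
      omega
  · rintro ⟨i', t', ht1, hle, heq, hx⟩
    refine ⟨(i' : Int), ⟨by omega, by omega⟩, ((i' + 2 * t' : ℕ) : Int),
      ⟨⟨by push_cast; omega, by push_cast; omega, ⟨(t' : Int) - 1, by push_cast; ring⟩⟩, ?_⟩, ?_⟩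
    · have hfd : PySem.Int.floordiv (((i' + 2 * t' : ℕ) : Int) - ↑i') 2 = (t' : Int) := by
        rw [PySem.Int.floordiv_eq_ediv_of_pos (by norm_num)]
        push_cast
        omega
      have e1 : (i' : Int) + (t' : Int) = ((i' + t' : ℕ) : Int) := by push_cast; ring
      rw [hfd, e1, PySem.List.slice_natCast, PySem.List.slice_natCast]
      convert heq using 2 <;> omega
    · rw [PySem.List.slice_natCast, hx]
      congr 1
      omega

theorem pvFoldB_nodup (cs : List Char) (t : Int) :
    ∀ (l : List Int) (p : Int × PySem.Set (List Char)), p.2.Nodup →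
      ((l.foldl (pvStepB cs t) p).2).Nodup := by
  intro l
  induction l with
  | nil => intro p hp; exact hp
  | cons a l ih =>
    intro p hp
    refine ih _ ?_
    unfold pvStepB
    dsimp only
    split <;> split <;> first
      | exact PySem.Set.nodup_add _ _ hp
      | exact hp

theorem pvInnerB_mem (cs : List Char) (t : ℕ) (ht : 1 ≤ t) :
    ∀ (k : ℕ), k + t ≤ cs.length → ∀ (seen : PySem.Set (List Char)) (x : List Char),
      (x ∈ ((PySem.List.pyRange ((k : Int) - 1) (-1) (-1)).foldl (pvStepB cs (t : Int))
              (((pvRun cs t k : ℕ) : Int), seen)).2 ↔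
        x ∈ seen ∨ ∃ k' : ℕ, k' < k ∧ t ≤ pvRun cs t k' ∧ x = (cs.drop k').take (2 * t)) := by
  intro k
  induction k with
  | zero =>
    intro _ seen x
    rw [PySem.List.pyRange_neg_one_eq_nil (by norm_num)]
    simp
  | succ k ih =>
    intro hk seen x
    have e0 : ((k + 1 : ℕ) : Int) - 1 = (k : Int) := by push_cast; ring
    rw [e0, PySem.List.pyRange_neg_one_cons (by omega), List.foldl_cons]
    have hlt : k + t < cs.length := by omega
    have hrunk : pvRun cs t k =
        if cs.getD k ' ' = cs.getD (k + t) ' ' then pvRun cs t (k + 1) + 1 else 0 := by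
      rw [pvRun]
      simp [hlt]
    have hstep : pvStepB cs (t : Int) (((pvRun cs t (k + 1) : ℕ) : Int), seen) (k : Int) =
        (((pvRun cs t k : ℕ) : Int),
          if t ≤ pvRun cs t k then PySem.Set.add seen ((cs.drop k).take (2 * t)) else seen) := by
      unfold pvStepB
      dsimp only
      have eget : ((k : Int) + (t : Int)) = ((k + t : ℕ) : Int) := by push_cast; ring
      rw [eget, PySem.List.pyGetD_natCast, PySem.List.pyGetD_natCast]
      have eslice : (k : Int) + 2 * (t : Int) = ((k + 2 * t : ℕ) : Int) := by push_cast; ring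
      rw [eslice, PySem.List.slice_natCast]
      have etake : List.take (k + 2 * t - k) (List.drop k cs) = (cs.drop k).take (2 * t) := by
        congr 1
        omega
      rw [etake]
      by_cases hm : cs.getD k ' ' = cs.getD (k + t) ' '
      · simp only [hm, hrunk, if_true]
        have ecast : ((pvRun cs t (k + 1) : ℕ) : Int) + 1 = (((pvRun cs t (k + 1) + 1 : ℕ)) : Int) := by
          push_cast
          ring
        rw [ecast]
        norm_cast
      · rw [if_neg hm, hrunk, if_neg hm]
        norm_cast
    rw [hstep]
    rw [ih (by omega) _ x]
    by_cases hrun : t ≤ pvRun cs t k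
    · rw [if_pos hrun, PySem.Set.mem_add]
      constructor
      · rintro ((hx | hx) | ⟨k', hk', h1, h2⟩)
        · exact Or.inl hx
        · exact Or.inr ⟨k, by omega, hrun, hx⟩
        · exact Or.inr ⟨k', by omega, h1, h2⟩
      · rintro (hx | ⟨k', hk', h1, h2⟩)
        · exact Or.inl (Or.inl hx)
        · rcases Nat.lt_succ_iff_lt_or_eq.mp hk' with h | rfl
          · exact Or.inr ⟨k', h, h1, h2⟩
          · exact Or.inl (Or.inr h2)
    · rw [if_neg hrun]
      constructor
      · rintro (hx | ⟨k', hk', h1, h2⟩)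
        · exact Or.inl hx
        · exact Or.inr ⟨k', by omega, h1, h2⟩
      · rintro (hx | ⟨k', hk', h1, h2⟩)
        · exact Or.inl hx
        · rcases Nat.lt_succ_iff_lt_or_eq.mp hk' with h | rfl
          · exact Or.inr ⟨k', h, h1, h2⟩
          · exact absurd h1 hrun

theorem pvLevelB_mem (cs : List Char) (t : ℕ) (ht : 1 ≤ t) (htn : t ≤ cs.length)
    (seen : PySem.Set (List Char)) (x : List Char) :
    x ∈ pvLevelB cs (t : Int) seen ↔
      x ∈ seen ∨ ∃ k : ℕ, t ≤ pvRun cs t k ∧ x = (cs.drop k).take (2 * t) := by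
  unfold pvLevelB
  rw [PySem.List.len_eq]
  have e0 : (cs.length : Int) - (t : Int) - 1 = ((cs.length - t : ℕ) : Int) - 1 := by omega
  have e1 : (0 : Int) = ((pvRun cs t (cs.length - t) : ℕ) : Int) := by
    have : pvRun cs t (cs.length - t) = 0 := by
      rw [pvRun]
      simp [show ¬(cs.length - t + t < cs.length) by omega]
    rw [this]
    simp
  rw [e0, e1, pvInnerB_mem cs t ht (cs.length - t) (by omega) seen x]
  constructor
  · rintro (hx | ⟨k', _, h1, h2⟩)
    · exact Or.inl hx
    · exact Or.inr ⟨k', h1, h2⟩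
  · rintro (hx | ⟨k', h1, h2⟩)
    · exact Or.inl hx
    · have hb := ((pvRun_ge_iff cs t t k').mp h1 (t - 1) (by omega)).1
      exact Or.inr ⟨k', by omega, h1, h2⟩

theorem pvOuterB_mem (cs : List Char) :
    ∀ (b : ℕ), b ≤ cs.length → ∀ (seen : PySem.Set (List Char)) (x : List Char),
      (x ∈ (PySem.List.pyRange 1 ((b : Int) + 1) 1).foldl (fun seen t => pvLevelB cs t seen) seen ↔
        x ∈ seen ∨ ∃ t k : ℕ, 1 ≤ t ∧ t ≤ b ∧ t ≤ pvRun cs t k ∧ x = (cs.drop k).take (2 * t)) := by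
  intro b
  induction b with
  | zero =>
    intro _ seen x
    rw [show ((0 : ℕ) : Int) + 1 = 1 by norm_num, PySem.List.pyRange_one_eq_nil (by norm_num)]
    simp
  | succ b ih =>
    intro hb seen x
    have e0 : ((b + 1 : ℕ) : Int) + 1 = ((b : Int) + 1) + 1 := by push_cast; ring
    rw [e0, PySem.List.pyRange_one_succ_right (by omega), List.foldl_append, List.foldl_cons,
      List.foldl_nil]
    have e1 : (b : Int) + 1 = ((b + 1 : ℕ) : Int) := by push_cast; ring
    rw [show pvLevelB cs ((b : Int) + 1) = pvLevelB cs (((b + 1 : ℕ)) : Int) from by rw [e1],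
      pvLevelB_mem cs (b + 1) (by omega) (by omega), ih (by omega) seen x]
    constructor
    · rintro ((hx | ⟨t, k, h1, h2, h3, h4⟩) | ⟨k, h1, h2⟩)
      · exact Or.inl hx
      · exact Or.inr ⟨t, k, h1, by omega, h3, h4⟩
      · exact Or.inr ⟨b + 1, k, by omega, by omega, h1, h2⟩
    · rintro (hx | ⟨t, k, h1, h2, h3, h4⟩)
      · exact Or.inl (Or.inl hx)
      · rcases Nat.lt_succ_iff_lt_or_eq.mp (Nat.lt_succ_of_le h2) with h | rfl
        · exact Or.inl (Or.inr ⟨t, k, h1, by omega, h3, h4⟩)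
        · exact Or.inr ⟨k, h3, h4⟩

theorem pvOuterB_nodup (cs : List Char) :
    ∀ (l : List Int) (seen : PySem.Set (List Char)), seen.Nodup →
      (l.foldl (fun seen t => pvLevelB cs t seen) seen).Nodup := by
  intro l
  induction l with
  | nil => intro seen h; exact h
  | cons a l ih =>
    intro seen h
    exact ih _ (pvFoldB_nodup cs a _ _ h)

theorem pvMemB (cs : List Char) (x : List Char) :
    x ∈ (PySem.List.pyRange 1 (PySem.Int.floordiv (PySem.List.len cs) 2 + 1) 1).foldl
          (fun seen t => pvLevelB cs t seen) PySem.Set.empty ↔ pvEcho cs x := by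
  have e0 : PySem.Int.floordiv (PySem.List.len cs) 2 = ((cs.length / 2 : ℕ) : Int) := by
    rw [PySem.List.len_eq, PySem.Int.floordiv_eq_ediv_of_pos (by norm_num)]
    omega
  rw [e0, pvOuterB_mem cs (cs.length / 2) (by omega) PySem.Set.empty x]
  unfold pvEcho
  constructor
  · rintro (hx | ⟨t, k, h1, h2, h3, h4⟩)
    · simp [PySem.Set.empty] at hx
    · obtain ⟨hle, heq⟩ := (pvEcho_iff_run cs k t h1).mpr h3
      exact ⟨k, t, h1, hle, heq, h4⟩
  · rintro ⟨i, t, h1, h2, h3, h4⟩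
    refine Or.inr ⟨t, i, h1, by omega, (pvEcho_iff_run cs i t h1).mp ⟨h2, h3⟩, h4⟩

-- ===== VERDICT (by name: the statement is the Claim_ definition above) =====
theorem distinctEchoSubstrings_spec : Claim_equal_distinctEchoSubstrings := by
  intro text _
  unfold Spec_distinctEchoSubstrings distinctEchoSubstrings distinctEchoSubstrings_alt
  set cs := text.toList
  have hnodupA : (PySem.Set.ofList (pvListA cs)).Nodup := PySem.Set.nodup_ofList _
  have hnodupB := pvOuterB_nodup cs
      (PySem.List.pyRange 1 (PySem.Int.floordiv (PySem.List.len cs) 2 + 1) 1)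
      PySem.Set.empty List.nodup_nil
  have hperm : (PySem.Set.ofList (pvListA cs)).Perm
      ((PySem.List.pyRange 1 (PySem.Int.floordiv (PySem.List.len cs) 2 + 1) 1).foldl
        (fun seen t => pvLevelB cs t seen) PySem.Set.empty) := by
    rw [List.perm_ext_iff_of_nodup hnodupA hnodupB]
    intro x
    rw [PySem.Set.mem_ofList, pvMemA, pvMemB]
  simp [PySem.Set.len, PySem.List.len_eq, hperm.length_eq]
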